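-- pv_equiv track=rewrite | github.com/erasmus-center-for-biomics/Nimbus | scripts/nimbus_filter.py | bases_in_indels
-- ===== SOURCE A (Python) =====
-- def bases_in_indels(cigar=None):
--     """
--     Determines the number of bases in Indels
--
--     Args:
--         cigar:  a list with cigar operations
--
--     Returns:
--         2 lists with the with the insertion, deletion and softclipped bases
--         (number, number of bases)
--     """
--     count = [0, 0, 0]
--     bases = [0, 0, 0]
--     for cig in cigar:
--         if cig[0] == 1: #cig[0] == 'I' or
--             count[0] += 1
--             bases[0] += cig[1]
--         elif cig[0] == 2: #cig[0] == 'D' or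
--             count[1] += 1
--             bases[1] += cig[1]
--         elif cig[0] == 4: #cig[0] == 'S' or
--             count[2] += 1
--             bases[2] += cig[1]
--     return (count, bases)
-- ===== SOURCE B (Python) =====
-- def bases_in_indels(cigar=None):
--     ins = [n for op, n in cigar if op == 1]
--     dele = [n for op, n in cigar if op == 2]
--     soft = [n for op, n in cigar if op == 4]
--     return ([len(ins), len(dele), len(soft)],
--             [sum(ins), sum(dele), sum(soft)])
-- ===== Notes on version B (the rewrite author's own statement) =====
-- stated objective: simpler
-- what changed: Replaces the single branching accumulator loop over two mutable 3-element lists with three filtered projections of the cigar, from which counts (len) and bases (sum) are read off directly.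
import Mathlib
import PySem

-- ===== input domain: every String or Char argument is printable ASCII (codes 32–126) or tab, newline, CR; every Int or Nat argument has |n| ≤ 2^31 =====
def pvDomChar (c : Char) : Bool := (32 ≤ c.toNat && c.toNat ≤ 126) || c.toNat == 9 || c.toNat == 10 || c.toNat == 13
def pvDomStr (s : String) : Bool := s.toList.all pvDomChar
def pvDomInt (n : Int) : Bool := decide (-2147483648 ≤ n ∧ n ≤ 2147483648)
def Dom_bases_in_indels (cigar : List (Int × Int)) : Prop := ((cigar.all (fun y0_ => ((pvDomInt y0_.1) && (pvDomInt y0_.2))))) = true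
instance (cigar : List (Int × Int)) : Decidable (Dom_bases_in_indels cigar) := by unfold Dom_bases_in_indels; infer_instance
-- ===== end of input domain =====

-- B replaces A's single branching accumulator loop with three filtered projections
-- (ins/del/soft), taking counts as lengths and bases as sums: simpler decomposition.


-- ===== PORT A =====
-- the body of A's for-loop: update the mutable 3-lists count/bases by branch on cig[0]
def biiStep (st : List Int × List Int) (cig : Int × Int) : List Int × List Int :=
  let count := st.1
  let bases := st.2
  if cig.1 == 1 then
    (count.set 0 (count.getD 0 0 + 1), bases.set 0 (bases.getD 0 0 + cig.2))
  else if cig.1 == 2 then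
    (count.set 1 (count.getD 1 0 + 1), bases.set 1 (bases.getD 1 0 + cig.2))
  else if cig.1 == 4 then
    (count.set 2 (count.getD 2 0 + 1), bases.set 2 (bases.getD 2 0 + cig.2))
  else st

def bases_in_indels (cigar : List (Int × Int)) : List Int × List Int :=
  cigar.foldl biiStep ([0, 0, 0], [0, 0, 0])

-- ===== PORT B =====
def bases_in_indels_alt (cigar : List (Int × Int)) : List Int × List Int :=
  let ins := (cigar.filter (fun c => c.1 == 1)).map (fun c => c.2)
  let dele := (cigar.filter (fun c => c.1 == 2)).map (fun c => c.2)
  let soft := (cigar.filter (fun c => c.1 == 4)).map (fun c => c.2)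
  ([(ins.length : Int), (dele.length : Int), (soft.length : Int)],
   [ins.sum, dele.sum, soft.sum])

-- ===== PRECONDITION & SPEC =====
def Spec_bases_in_indels (cigar : List (Int × Int)) (out : List Int × List Int) : Prop := out = bases_in_indels_alt cigar
instance (cigar : List (Int × Int)) (out : List Int × List Int) : Decidable (Spec_bases_in_indels cigar out) := by unfold Spec_bases_in_indels; infer_instance

-- ===== CLAIM (what is proved, stated in full; the proofs are below) =====
def Claim_equal_bases_in_indels : Prop := ∀ (cigar : List (Int × Int)), Dom_bases_in_indels cigar → Spec_bases_in_indels cigar (bases_in_indels cigar)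

-- ===== LEMMAS AND PROOFS =====

lemma bii_fold (cigar : List (Int × Int)) : ∀ (c0 c1 c2 b0 b1 b2 : Int),
    cigar.foldl biiStep ([c0, c1, c2], [b0, b1, b2]) =
      ([c0 + ((cigar.filter (fun c => c.1 == 1)).length : Int),
        c1 + ((cigar.filter (fun c => c.1 == 2)).length : Int),
        c2 + ((cigar.filter (fun c => c.1 == 4)).length : Int)],
       [b0 + ((cigar.filter (fun c => c.1 == 1)).map (fun c => c.2)).sum,
        b1 + ((cigar.filter (fun c => c.1 == 2)).map (fun c => c.2)).sum,
        b2 + ((cigar.filter (fun c => c.1 == 4)).map (fun c => c.2)).sum]) := by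
  induction cigar with
  | nil => intro c0 c1 c2 b0 b1 b2; simp
  | cons hd tl ih =>
    intro c0 c1 c2 b0 b1 b2
    by_cases h1 : hd.1 = 1
    · simp [biiStep, h1, List.foldl_cons, ih, add_assoc, add_comm]
    · by_cases h2 : hd.1 = 2
      · simp [biiStep, h1, h2, List.foldl_cons, ih, add_assoc, add_comm]
      · by_cases h4 : hd.1 = 4
        · simp [biiStep, h1, h2, h4, List.foldl_cons, ih, add_assoc, add_comm]
        · simp [biiStep, h1, h2, h4, List.foldl_cons, ih]

-- ===== VERDICT (by name: the statement is the Claim_ definition above) =====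
theorem bases_in_indels_spec : Claim_equal_bases_in_indels := by
  intro cigar _
  show bases_in_indels cigar = bases_in_indels_alt cigar
  simp [bases_in_indels, bases_in_indels_alt, bii_fold]
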